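-- pv_equiv track=rewrite | github.com/Mabiruto/tiny_python_projects | 14_rhymer/rhymer.py | stemmer
-- ===== SOURCE A (Python) =====
-- def stemmer(word):
--     str_1 = ''
--     str_2 = ''
--     arb_val = 0
--     for letter in word:
--         if letter in 'aeiouAEIOU':
--             arb_val += 1
--             str_2 += letter.lower()
--         elif arb_val != 0:
--             str_2 += letter.lower()
--         else:
--             str_1 += letter.lower()
--     return (str_1, str_2)
--     """
--     consonants = ''.join([c for c in string.ascii_lowercase if c not in 'aeiou'])
--     match = re.match(f'([{consonants}]+)?(.*)', word.lower())
--     return (match.group(1) or '', match.group(2) or '') if match else ('', '')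
--     """
-- ===== SOURCE B (Python) =====
-- def stemmer(word):
--     i = next((k for k, c in enumerate(word) if c in 'aeiouAEIOU'), len(word))
--     return (word[:i].lower(), word[i:].lower())
-- ===== Notes on version B (the rewrite author's own statement) =====
-- stated objective: simpler
-- what changed: Replaced A's per-character dual-accumulator loop with a seen-vowel counter by a locate-then-slice decomposition: find the index of the first vowel, then slice and lowercase the two halves.
import Mathlib
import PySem

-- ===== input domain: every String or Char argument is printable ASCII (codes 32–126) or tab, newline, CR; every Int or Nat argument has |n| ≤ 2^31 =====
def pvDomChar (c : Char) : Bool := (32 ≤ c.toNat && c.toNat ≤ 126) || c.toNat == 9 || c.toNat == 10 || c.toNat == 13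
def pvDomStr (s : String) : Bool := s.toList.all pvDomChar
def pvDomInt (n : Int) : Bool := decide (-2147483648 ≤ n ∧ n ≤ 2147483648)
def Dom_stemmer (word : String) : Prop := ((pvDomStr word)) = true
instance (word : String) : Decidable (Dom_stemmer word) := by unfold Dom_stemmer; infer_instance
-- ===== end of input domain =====

-- B replaces A's per-character dual-accumulator loop (with a seen-vowel counter) by a
-- locate-then-slice decomposition: find the first vowel's index, slice, lowercase. Objective: simpler.

-- shared helper: c in 'aeiouAEIOU'
def pvIsVowel (c : Char) : Bool := "aeiouAEIOU".toList.contains c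

-- ===== PORT A =====
-- A's loop body: one step updating (str_1, str_2, arb_val)
def pvStepA (st : List Char × List Char × Int) (letter : Char) : List Char × List Char × Int :=
  if pvIsVowel letter then
    (st.1, st.2.1 ++ [PySem.Chars.lowerChar letter], st.2.2 + 1)
  else if st.2.2 ≠ 0 then
    (st.1, st.2.1 ++ [PySem.Chars.lowerChar letter], st.2.2)
  else
    (st.1 ++ [PySem.Chars.lowerChar letter], st.2.1, st.2.2)

def stemmer (word : String) : String × String :=
  let r := word.toList.foldl pvStepA ([], [], 0)
  (String.ofList r.1, String.ofList r.2.1)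

-- ===== PORT B =====
-- index of the first vowel, default = length (Python's next(…, len(word)))
def pvFirstVowelIdx : List Char → Nat
  | [] => 0
  | c :: t => if pvIsVowel c then 0 else pvFirstVowelIdx t + 1

def stemmer_alt (word : String) : String × String :=
  let i : Int := (pvFirstVowelIdx word.toList : Int)
  (PySem.Str.lower (PySem.Str.slice word none (some i)),
   PySem.Str.lower (PySem.Str.slice word (some i) none))

-- ===== PRECONDITION & SPEC =====
def Spec_stemmer (word : String) (out : String × String) : Prop := out = stemmer_alt word
instance (word : String) (out : String × String) : Decidable (Spec_stemmer word out) := by unfold Spec_stemmer; infer_instance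

-- ===== CLAIM (what is proved, stated in full; the proofs are below) =====
def Claim_equal_stemmer : Prop := ∀ (word : String), Dom_stemmer word → Spec_stemmer word (stemmer word)

-- ===== LEMMAS AND PROOFS =====

-- once the vowel counter is positive, every remaining letter is appended to str_2
theorem pv_foldl_after (cs : List Char) (s1 s2 : List Char) (a : Int) (ha : 0 < a) :
    ∃ a', List.foldl pvStepA (s1, s2, a) cs = (s1, s2 ++ PySem.Chars.lower cs, a') ∧ 0 < a' := by
  induction cs generalizing s2 a with
  | nil => exact ⟨a, by simp [PySem.Chars.lower], ha⟩
  | cons c t ih =>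
    rw [List.foldl_cons]
    by_cases hv : pvIsVowel c = true
    · rw [show pvStepA (s1, s2, a) c = (s1, s2 ++ [PySem.Chars.lowerChar c], a + 1) by
        simp [pvStepA, hv]]
      obtain ⟨a', h, ha'⟩ := ih (s2 ++ [PySem.Chars.lowerChar c]) (a + 1) (by omega)
      exact ⟨a', by simp [h, PySem.Chars.lower], ha'⟩
    · rw [show pvStepA (s1, s2, a) c = (s1, s2 ++ [PySem.Chars.lowerChar c], a) by
        simp [pvStepA, hv]; omega]
      obtain ⟨a', h, ha'⟩ := ih (s2 ++ [PySem.Chars.lowerChar c]) a ha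
      exact ⟨a', by simp [h, PySem.Chars.lower], ha'⟩

-- from the initial state the loop splits the word at the first vowel
theorem pv_foldl_main (cs : List Char) (s1 : List Char) :
    ∃ a', List.foldl pvStepA (s1, [], 0) cs
      = (s1 ++ PySem.Chars.lower (cs.take (pvFirstVowelIdx cs)),
         PySem.Chars.lower (cs.drop (pvFirstVowelIdx cs)), a') := by
  induction cs generalizing s1 with
  | nil => exact ⟨0, by simp [pvFirstVowelIdx, PySem.Chars.lower]⟩
  | cons c t ih =>
    rw [List.foldl_cons]
    by_cases hv : pvIsVowel c = true
    · rw [show pvStepA (s1, [], 0) c = (s1, [PySem.Chars.lowerChar c], 1) by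
        simp [pvStepA, hv]]
      obtain ⟨a', h, _⟩ := pv_foldl_after t s1 [PySem.Chars.lowerChar c] 1 (by omega)
      exact ⟨a', by simp [h, pvFirstVowelIdx, hv, PySem.Chars.lower]⟩
    · rw [show pvStepA (s1, [], 0) c = (s1 ++ [PySem.Chars.lowerChar c], [], 0) by
        simp [pvStepA, hv]]
      obtain ⟨a', h⟩ := ih (s1 ++ [PySem.Chars.lowerChar c])
      exact ⟨a', by simp [h, pvFirstVowelIdx, hv, PySem.Chars.lower]⟩

-- ===== VERDICT (by name: the statement is the Claim_ definition above) =====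
theorem stemmer_spec : Claim_equal_stemmer := by
  intro word _
  unfold Spec_stemmer stemmer stemmer_alt
  obtain ⟨a', h⟩ := pv_foldl_main word.toList []
  apply Prod.ext <;>
  · apply String.toList_injective
    simp [h, PySem.List.slice_to_natCast, PySem.List.slice_from_natCast]
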